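-- pv_equiv track=rewrite | github.com/HishamKhalil1990/madlib-cli | madlib_cli/madlib.py | remove_parts
-- ===== SOURCE A (Python) =====
-- def remove_parts(word):
--     str = ""
--     stop = False
--     for char in word:
--         if char == "{":
--             stop = True
--         if stop == False:
--             str = str + char
--         if char == "}":
--             stop = False
--     return str
-- ===== SOURCE B (Python) =====
-- def remove_parts(word):
--     o = word.find("{")
--     if o == -1:
--         return word
--     c = word.find("}", o + 1)
--     if c == -1:
--         return word[:o]
--     return word[:o] + remove_parts(word[c + 1:])
-- ===== Notes on version B (the rewrite author's own statement) =====
-- stated objective: faster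
-- what changed: Replaced the Python-level character-by-character scan with a stop flag and quadratic string concatenation by a recursion that jumps between brace positions with str.find and concatenates whole slices outside the braces (C-level find/slice, no per-character Python work).
import Mathlib
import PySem

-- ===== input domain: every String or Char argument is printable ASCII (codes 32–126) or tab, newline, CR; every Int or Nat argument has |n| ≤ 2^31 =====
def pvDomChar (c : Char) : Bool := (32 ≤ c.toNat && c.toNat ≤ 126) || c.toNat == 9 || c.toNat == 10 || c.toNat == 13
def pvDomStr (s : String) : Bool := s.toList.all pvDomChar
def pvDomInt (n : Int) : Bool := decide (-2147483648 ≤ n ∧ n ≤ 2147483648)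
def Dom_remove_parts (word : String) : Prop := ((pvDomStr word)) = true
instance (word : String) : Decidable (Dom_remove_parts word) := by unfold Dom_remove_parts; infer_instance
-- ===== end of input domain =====

-- B replaces A's char-by-char scan with a stop flag by a recursion that jumps
-- between brace positions with str.find and concatenates whole slices
-- (measurably faster in a timing run). Equivalence proved on all strings.

-- ===== PORT A =====
-- literal transliteration of A's loop: state (str, stop), the three ifs in order
def remove_parts (word : String) : String :=
  (word.toList.foldl
    (fun (st : String × Bool) char =>
      let stop := if char = '{' then true else st.2
      let s := if stop = false then st.1.push char else st.1
      let stop := if char = '}' then false else stop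
      (s, stop))
    ("", false)).1

-- ===== PORT B =====
-- termination helper lemma, cited by the port's decreasing_by
theorem pvDropLt (l : List Char) (c : Int) (hl : 0 < l.length) (hc : 0 ≤ c) :
    (PySem.List.slice l (some (c + 1)) none).length < l.length := by
  rw [PySem.List.slice_from (a := c + 1) (ha := by omega)]
  simp only [List.length_drop]
  omega

theorem pvFindFromNonneg (l : List Char) (o : Int) (ho : PySem.Chars.find l ['{'] = o)
    (hne : o ≠ -1) (c : Int) (hc : PySem.Chars.findFrom l ['}'] (o + 1) none = c)
    (hcne : c ≠ -1) : 0 ≤ c ∧ 0 ≤ o := by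
  have h0 : 0 ≤ o := by
    have := PySem.Chars.neg_one_le_find l ['{']
    omega
  have hlt : o < l.length := by
    have hinf : ['{'] <:+: l := (PySem.Chars.find_ne_neg_one_iff _ _).1 (ho ▸ hne)
    have hsp := (PySem.Chars.find_spec (s := l) (sub := ['{'])
      (by rw [ho]; exact h0)).1
    rcases hsp with ⟨t, ht⟩
    have : 0 < (l.drop (PySem.Chars.find l ['{']).toNat).length := by
      rw [← ht]; simp
    rw [ho] at this
    simp only [List.length_drop] at this
    omega
  have hk : o.toNat + 1 ≤ l.length := by omega
  have hcast : o + 1 = ((o.toNat + 1 : Nat) : Int) := by omega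
  rw [hcast, PySem.Chars.findFrom_natCast (hk := hk)] at hc
  split at hc
  · omega
  · have := PySem.Chars.neg_one_le_find (l.drop (o.toNat + 1)) ['}']
    omega

def remove_parts_alt (word : String) : String :=
  let o := PySem.Str.find word "{"
  if o = -1 then word
  else
    let c := PySem.Str.findFrom word "}" (o + 1) none
    if c = -1 then PySem.Str.slice word none (some o)
    else PySem.Str.slice word none (some o)
         ++ remove_parts_alt (PySem.Str.slice word (some (c + 1)) none)
termination_by word.toList.length
decreasing_by
  rename_i ho hc
  have h1 : PySem.Chars.find word.toList ['{'] ≠ -1 := by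
    simpa [PySem.Str.find, o] using ho
  have h2 : ['{'] <:+: word.toList := (PySem.Chars.find_ne_neg_one_iff _ _).1 h1
  have hl : 0 < word.toList.length := by
    rcases h2 with ⟨p, s, hps⟩
    have : word.toList.length = p.length + 1 + s.length := by
      rw [← hps]; simp; omega
    omega
  have hc0 : 0 ≤ c ∧ 0 ≤ o := by
    refine pvFindFromNonneg word.toList o ?_ ?_ c ?_ ?_
    · simp [o]
    · simpa [o] using ho
    · simp [c, o]
    · simpa [c] using hc
  have := pvDropLt word.toList c hl hc0.1
  simpa [PySem.Str.slice] using this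

-- ===== PRECONDITION & SPEC =====
def Spec_remove_parts (word : String) (out : String) : Prop := out = remove_parts_alt word
instance (word : String) (out : String) : Decidable (Spec_remove_parts word out) := by unfold Spec_remove_parts; infer_instance

-- ===== CLAIM (what is proved, stated in full; the proofs are below) =====
def Claim_equal_remove_parts : Prop := ∀ (word : String), Dom_remove_parts word → Spec_remove_parts word (remove_parts word)

-- ===== LEMMAS AND PROOFS =====

-- common specification: gRem false = "copying" state, gRem true = inside braces
def gRem : Bool → List Char → List Char
  | _, [] => []
  | false, c :: cs => if c = '{' then gRem true cs else c :: gRem false cs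
  | true, c :: cs => if c = '}' then gRem false cs else gRem true cs

-- ---- A-side ----
-- the loop body of remove_parts, named for the proofs (definitionally the same lambda)
def aStep (st : String × Bool) (char : Char) : String × Bool :=
  let stop := if char = '{' then true else st.2
  let s := if stop = false then st.1.push char else st.1
  let stop := if char = '}' then false else stop
  (s, stop)

theorem remove_parts_def (word : String) :
    remove_parts word = (word.toList.foldl aStep ("", false)).1 := rfl

theorem aStep_open (s : String) : aStep (s, false) '{' = (s, true) := by
  simp [aStep]

theorem aStep_keep (s : String) (c : Char) (h : c ≠ '{') :
    aStep (s, false) c = (s.push c, false) := by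
  simp [aStep, h]

theorem aStep_close (s : String) : aStep (s, true) '}' = (s, false) := by
  simp [aStep]

theorem aStep_skip (s : String) (c : Char) (h : c ≠ '}') :
    aStep (s, true) c = (s, true) := by
  by_cases h2 : c = '{' <;> simp [aStep, h, h2]

theorem foldA_eq (cs : List Char) (s : String) (b : Bool) :
    ((cs.foldl aStep (s, b)).1).toList = s.toList ++ gRem b cs := by
  induction cs generalizing s b with
  | nil => simp [gRem]
  | cons c cs ih =>
    rw [List.foldl_cons]
    cases b with
    | false =>
      by_cases h : c = '{'
      · subst h; rw [aStep_open, ih]; simp [gRem]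
      · rw [aStep_keep s c h, ih]; simp [gRem, h]
    | true =>
      by_cases h : c = '}'
      · subst h; rw [aStep_close, ih]; simp [gRem]
      · rw [aStep_skip s c h, ih]; simp [gRem, h]

theorem remove_parts_toList (word : String) :
    (remove_parts word).toList = gRem false word.toList := by
  rw [remove_parts_def, foldA_eq]
  simp

-- ---- gRem structural lemmas ----
theorem gRem_false_no_brace (xs : List Char) (h : '{' ∉ xs) : gRem false xs = xs := by
  induction xs with
  | nil => rfl
  | cons c cs ih =>
    simp only [List.mem_cons, not_or] at h
    simp [gRem, Ne.symm h.1, ih h.2]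

theorem gRem_false_append (xs ys : List Char) (h : '{' ∉ xs) :
    gRem false (xs ++ '{' :: ys) = xs ++ gRem true ys := by
  induction xs with
  | nil => simp [gRem]
  | cons c cs ih =>
    simp only [List.mem_cons, not_or] at h
    simp [gRem, Ne.symm h.1, ih h.2]

theorem gRem_true_no_close (ys : List Char) (h : '}' ∉ ys) : gRem true ys = [] := by
  induction ys with
  | nil => rfl
  | cons c cs ih =>
    simp only [List.mem_cons, not_or] at h
    simp [gRem, Ne.symm h.1, ih h.2]

theorem gRem_true_append (ys zs : List Char) (h : '}' ∉ ys) :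
    gRem true (ys ++ '}' :: zs) = gRem false zs := by
  induction ys with
  | nil => simp [gRem]
  | cons c cs ih =>
    simp only [List.mem_cons, not_or] at h
    simp [gRem, Ne.symm h.1, ih h.2]

-- ---- find characterisation ----
theorem singleton_prefix_iff (a : Char) (ys : List Char) :
    [a] <+: ys ↔ ys.head? = some a := by
  constructor
  · rintro ⟨t, rfl⟩; rfl
  · intro h; cases ys with
    | nil => simp at h
    | cons y ys => simp at h; exact ⟨ys, by simp [h]⟩

-- find l [a] = o ≥ 0 means: l splits at o' = o.toNat around a, nothing equal to a before
theorem find_decomp (l : List Char) (a : Char) (o : Int)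
    (ho : PySem.Chars.find l [a] = o) (hne : o ≠ -1) :
    0 ≤ o ∧ o < l.length ∧ l = l.take o.toNat ++ a :: l.drop (o.toNat + 1) ∧
      a ∉ l.take o.toNat := by
  have h0 : 0 ≤ o := by have := PySem.Chars.neg_one_le_find l [a]; omega
  have hsp := PySem.Chars.find_spec (s := l) (sub := [a]) (by rw [ho]; exact h0)
  rw [ho] at hsp
  obtain ⟨hpre, hmin⟩ := hsp
  rw [singleton_prefix_iff] at hpre
  have hget : l[o.toNat]? = some a := by
    rw [← List.head?_drop]; exact hpre
  obtain ⟨hlen, hgetE⟩ := List.getElem?_eq_some_iff.1 hget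
  have hlt : o < l.length := by omega
  refine ⟨h0, hlt, ?_, ?_⟩
  · conv_lhs => rw [← List.take_append_drop o.toNat l]
    congr 1
    rw [List.drop_eq_getElem_cons hlen, hgetE]
  · intro hmem
    obtain ⟨i, hi, hgi⟩ := List.mem_iff_getElem.1 hmem
    have hi' : i < o.toNat := by simp at hi; omega
    refine hmin i hi' ?_
    rw [singleton_prefix_iff, List.head?_drop, List.getElem?_eq_some_iff]
    exact ⟨by omega, by simpa [List.getElem_take] using hgi⟩

theorem find_none_not_mem (l : List Char) (a : Char)
    (h : PySem.Chars.find l [a] = -1) : a ∉ l := by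
  intro hmem
  have : [a] <:+: l := (List.singleton_infix_iff a l).2 hmem
  exact (PySem.Chars.find_eq_neg_one_iff _ _).1 h this

-- ---- B-side: remove_parts_alt computes gRem false ----
theorem alt_eq (word : String) :
    (remove_parts_alt word).toList = gRem false word.toList := by
  fun_induction remove_parts_alt word with
  | case1 word o ho =>
    have ho' : PySem.Str.find word "{" = -1 := ho
    have h : PySem.Chars.find word.toList ['{'] = -1 := by
      simpa using ho'
    rw [gRem_false_no_brace _ (find_none_not_mem _ _ h)]
  | case2 word o ho c hc =>
    have ho' : PySem.Chars.find word.toList ['{'] = o := by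
      have : PySem.Str.find word "{" = o := rfl
      simpa using this
    have hone : o ≠ -1 := ho
    obtain ⟨h0, hlt, hsplit, hnot⟩ := find_decomp word.toList '{' o ho' hone
    have hc' : PySem.Chars.findFrom word.toList ['}'] (o + 1) none = -1 := by
      have : PySem.Str.findFrom word "}" (o + 1) none = -1 := hc
      simpa using this
    have hcast : o + 1 = ((o.toNat + 1 : Nat) : Int) := by omega
    have hk : o.toNat + 1 ≤ word.toList.length := by omega
    rw [hcast, PySem.Chars.findFrom_natCast (hk := hk)] at hc'
    have hfind : PySem.Chars.find (word.toList.drop (o.toNat + 1)) ['}'] = -1 := by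
      by_contra hne
      rw [if_neg hne] at hc'
      have := PySem.Chars.neg_one_le_find (word.toList.drop (o.toNat + 1)) ['}']
      omega
    have hnc : '}' ∉ word.toList.drop (o.toNat + 1) := find_none_not_mem _ _ hfind
    conv_rhs => rw [hsplit]
    rw [gRem_false_append _ _ hnot, gRem_true_no_close _ hnc]
    simp [PySem.List.slice_to word.toList h0]
  | case3 word o ho c hc ih =>
    have ho' : PySem.Chars.find word.toList ['{'] = o := by
      have : PySem.Str.find word "{" = o := rfl
      simpa using this
    have hone : o ≠ -1 := ho
    obtain ⟨h0, hlt, hsplit, hnot⟩ := find_decomp word.toList '{' o ho' hone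
    have hc' : PySem.Chars.findFrom word.toList ['}'] (o + 1) none = c := by
      have : PySem.Str.findFrom word "}" (o + 1) none = c := rfl
      simpa using this
    have hcast : o + 1 = ((o.toNat + 1 : Nat) : Int) := by omega
    have hk : o.toNat + 1 ≤ word.toList.length := by omega
    rw [hcast, PySem.Chars.findFrom_natCast (hk := hk)] at hc'
    have hcne : c ≠ -1 := hc
    have hfne : PySem.Chars.find (word.toList.drop (o.toNat + 1)) ['}'] ≠ -1 := by
      intro h; rw [if_pos h] at hc'; exact hcne hc'.symm
    rw [if_neg hfne] at hc'
    set f := PySem.Chars.find (word.toList.drop (o.toNat + 1)) ['}'] with hfdef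
    obtain ⟨hf0, hflt, hfsplit, hfnot⟩ :=
      find_decomp (word.toList.drop (o.toNat + 1)) '}' f rfl hfne
    -- c = (o.toNat + 1) + f, hence (c + 1).toNat = o.toNat + 1 + (f.toNat + 1)
    have hcval : c = ((o.toNat + 1 : Nat) : Int) + f := hc'.symm
    have hC : (c + 1).toNat = o.toNat + 1 + (f.toNat + 1) := by omega
    have hrest : word.toList.drop ((c + 1).toNat)
        = (word.toList.drop (o.toNat + 1)).drop (f.toNat + 1) := by
      rw [List.drop_drop]
      congr 1
    -- right-hand side
    conv_rhs => rw [hsplit]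
    rw [gRem_false_append _ _ hnot]
    conv_rhs => rw [hfsplit]
    rw [gRem_true_append _ _ hfnot, ← hrest]
    -- left-hand side
    rw [String.toList_append, ih]
    have hsl : (PySem.Str.slice word (some (c + 1)) none).toList
        = word.toList.drop ((c + 1).toNat) := by
      simp [PySem.List.slice_from (a := c + 1) (ha := by omega)]
    have hsl2 : (PySem.Str.slice word none (some o)).toList
        = word.toList.take o.toNat := by
      simp [PySem.List.slice_to word.toList h0]
    rw [hsl, hsl2]

-- ===== VERDICT (by name: the statement is the Claim_ definition above) =====
theorem remove_parts_spec : Claim_equal_remove_parts := by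
  intro word _
  unfold Spec_remove_parts
  have h1 := remove_parts_toList word
  have h2 := alt_eq word
  exact String.toList_inj.1 (h1.trans h2.symm)
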